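-- pv_equiv track=rewrite | github.com/abdelkarim-choukri/sro-proof-hotpot | tools/exp_a1_lex_features.py | extract_question_entities
-- ===== SOURCE A (Python) =====
-- import string
-- from typing import Any, Dict, List, Optional, Set, Tuple
--
-- STOP_WORDS = {
--     "the", "a", "an", "and", "or", "but", "in", "on", "at", "to",
--     "for", "of", "with", "by", "from", "as", "is", "was", "are",
--     "were", "be", "been", "have", "has", "had", "do", "did", "does",
--     "will", "would", "could", "should", "may", "might", "shall",
--     "not", "no", "nor", "so", "yet", "both", "either", "neither",
--     "each", "than", "that", "this", "these", "those", "what", "which",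
--     "who", "whom", "whose", "when", "where", "why", "how", "if",
--     "though", "although", "because", "since", "while", "after",
--     "before", "until", "unless", "also", "just", "more", "most",
--     "same", "such", "than", "then", "there", "their", "they",
--     "he", "she", "it", "we", "you", "i", "his", "her", "its",
--     "our", "your", "my", "its", "his", "her",
-- }
--
-- def extract_question_entities(question: str) -> List[str]:
--     """
--     Extract named entity candidates from a question using capitalization
--     heuristics. No NER model — pure string operations.
--
--     Strategy:
--     1. Tokenize preserving original case
--     2. Skip the first token (sentence-initial capital is not an entity)
--     3. Keep tokens that start with a capital letter and are not stop words
--     4. Merge consecutive capitalized tokens into multi-word entities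
--
--     Example: "Were Scott Derrickson and Ed Wood of the same nationality?"
--     → ["Scott Derrickson", "Ed Wood"]
--     """
--     # Split on whitespace, keep punctuation attached for now
--     raw_tokens = question.split()
--     if not raw_tokens:
--         return []
--
--     # Strip punctuation from each token but preserve case
--     cleaned = []
--     for tok in raw_tokens:
--         t = tok.strip(string.punctuation)
--         if t:
--             cleaned.append(t)
--
--     if not cleaned:
--         return []
--
--     # Skip index 0 (sentence-initial capital)
--     entities = []
--     current_entity = []
--
--     for i, tok in enumerate(cleaned):
--         if i == 0:
--             # Always skip first token regardless of case
--             if current_entity: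
--                 entities.append(" ".join(current_entity))
--                 current_entity = []
--             continue
--
--         is_capitalized = tok and tok[0].isupper()
--         is_stopword    = tok.lower() in STOP_WORDS
--
--         if is_capitalized and not is_stopword:
--             current_entity.append(tok)
--         else:
--             if current_entity:
--                 entities.append(" ".join(current_entity))
--                 current_entity = []
--
--     if current_entity:
--         entities.append(" ".join(current_entity))
--
--     return entities
-- ===== SOURCE B (Python) =====
-- import string
-- from typing import List
--
-- STOP_WORDS = {
--     "the", "a", "an", "and", "or", "but", "in", "on", "at", "to",
--     "for", "of", "with", "by", "from", "as", "is", "was", "are",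
--     "were", "be", "been", "have", "has", "had", "do", "did", "does",
--     "will", "would", "could", "should", "may", "might", "shall",
--     "not", "no", "nor", "so", "yet", "both", "either", "neither",
--     "each", "than", "that", "this", "these", "those", "what", "which",
--     "who", "whom", "whose", "when", "where", "why", "how", "if",
--     "though", "although", "because", "since", "while", "after",
--     "before", "until", "unless", "also", "just", "more", "most",
--     "same", "such", "then", "there", "their", "they",
--     "he", "she", "it", "we", "you", "i", "his", "her", "its",
--     "our", "your", "my",
-- }
--
--
-- def _group_runs(pairs):
--     """Join each maximal run of flagged tokens into one entity string."""
--     if not pairs: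
--         return []
--     (t, b), rest = pairs[0], pairs[1:]
--     if b:
--         k = 0
--         while k < len(rest) and rest[k][1]:
--             k += 1
--         run = [t] + [x for x, _ in rest[:k]]
--         return [" ".join(run)] + _group_runs(rest[k:])
--     return _group_runs(rest)
--
--
-- def extract_question_entities(question: str) -> List[str]:
--     cleaned = [t for tok in question.split()
--                if (t := tok.strip(string.punctuation))]
--     if not cleaned:
--         return []
--     # classification pass: which tokens qualify as entity words
--     flags = [i != 0 and tok[0].isupper() and tok.lower() not in STOP_WORDS
--              for i, tok in enumerate(cleaned)]
--     # grouping pass: maximal runs of qualified tokens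
--     return _group_runs(list(zip(cleaned, flags)))
-- ===== Notes on version B (the rewrite author's own statement) =====
-- stated objective: alternative
-- what changed: Replaces A's single stateful accumulator loop (current_entity/entities with flush logic) by a two-pass decomposition: a classification pass computing a qualification flag per cleaned token, then a run-grouping pass that joins each maximal run of flagged tokens.
import Mathlib
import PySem

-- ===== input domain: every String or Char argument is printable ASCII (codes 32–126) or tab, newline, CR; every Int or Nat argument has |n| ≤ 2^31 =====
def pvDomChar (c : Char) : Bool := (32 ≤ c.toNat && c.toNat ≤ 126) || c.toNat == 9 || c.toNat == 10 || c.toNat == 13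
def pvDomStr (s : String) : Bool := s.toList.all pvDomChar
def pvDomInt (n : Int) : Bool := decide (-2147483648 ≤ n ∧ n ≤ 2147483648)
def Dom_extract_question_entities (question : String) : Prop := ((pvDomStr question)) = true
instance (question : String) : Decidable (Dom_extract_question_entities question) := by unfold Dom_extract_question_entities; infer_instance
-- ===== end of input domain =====

-- B replaces A's stateful accumulator loop by a classification pass (flags) plus a run-grouping pass; same cost, different decomposition.

-- ===== PORT A =====
def pvStopWords : List String :=
  ["the", "a", "an", "and", "or", "but", "in", "on", "at", "to",
   "for", "of", "with", "by", "from", "as", "is", "was", "are",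
   "were", "be", "been", "have", "has", "had", "do", "did", "does",
   "will", "would", "could", "should", "may", "might", "shall",
   "not", "no", "nor", "so", "yet", "both", "either", "neither",
   "each", "than", "that", "this", "these", "those", "what", "which",
   "who", "whom", "whose", "when", "where", "why", "how", "if",
   "though", "although", "because", "since", "while", "after",
   "before", "until", "unless", "also", "just", "more", "most",
   "same", "such", "then", "there", "their", "they",
   "he", "she", "it", "we", "you", "i", "his", "her", "its",
   "our", "your", "my"]

def pvPunct : String := "!\"#$%&'()*+,-./:;<=>?@[\\]^_`{|}~"

-- body of A's `for i, tok in enumerate(cleaned)` loop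
def pvStepA (st : List String × List String) (p : Int × String) : List String × List String :=
  let entities := st.1
  let current := st.2
  if p.1 = 0 then
    if current ≠ [] then (entities ++ [PySem.Str.join " " current], []) else (entities, current)
  else
    let is_capitalized : Bool :=
      match p.2.toList with
      | [] => false
      | c :: _ => PySem.Chars.isupper c
    let is_stopword : Bool := pvStopWords.contains (PySem.Str.lower p.2)
    if is_capitalized && !is_stopword then (entities, current ++ [p.2])
    else if current ≠ [] then (entities ++ [PySem.Str.join " " current], []) else (entities, current)

def extract_question_entities (question : String) : List String :=
  let raw_tokens := PySem.Str.split₀ question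
  if raw_tokens = [] then []
  else
    let cleaned := raw_tokens.foldl (fun acc tok =>
      let t := PySem.Str.stripChars tok pvPunct
      if t ≠ "" then acc ++ [t] else acc) []
    if cleaned = [] then []
    else
      let st := (PySem.List.enumerate cleaned 0).foldl pvStepA ([], [])
      if st.2 ≠ [] then st.1 ++ [PySem.Str.join " " st.2] else st.1

-- ===== PORT B =====
-- flag of a cleaned token: i != 0 and tok[0].isupper() and tok.lower() not in STOP_WORDS
def pvFlag (i : Int) (tok : String) : Bool :=
  decide (i ≠ 0) &&
  (match PySem.Str.pyGet? tok 0 with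
   | some c => PySem.Chars.isupper c
   | none => false) &&
  !(pvStopWords.contains (PySem.Str.lower tok))

-- join each maximal run of flagged tokens into one entity string
def pvGroupRuns : List (String × Bool) → List String
  | [] => []
  | (t, b) :: rest =>
    if b then
      PySem.Str.join " " (t :: (rest.takeWhile (·.2)).map (·.1)) :: pvGroupRuns (rest.dropWhile (·.2))
    else pvGroupRuns rest
termination_by l => l.length
decreasing_by
  · exact Nat.lt_succ_of_le (List.length_dropWhile_le _ _)
  · simp

def extract_question_entities_alt (question : String) : List String :=
  let cleaned := (PySem.Str.split₀ question).filterMap (fun tok =>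
    let t := PySem.Str.stripChars tok pvPunct
    if t = "" then none else some t)
  if cleaned = [] then []
  else
    let flags := (PySem.List.enumerate cleaned 0).map (fun p => pvFlag p.1 p.2)
    pvGroupRuns (cleaned.zip flags)

-- ===== PRECONDITION & SPEC =====
def Spec_extract_question_entities (question : String) (out : List String) : Prop := out = extract_question_entities_alt question
instance (question : String) (out : List String) : Decidable (Spec_extract_question_entities question out) := by unfold Spec_extract_question_entities; infer_instance

-- ===== CLAIM (what is proved, stated in full; the proofs are below) =====
def Claim_equal_extract_question_entities : Prop := ∀ (question : String), Dom_extract_question_entities question → Spec_extract_question_entities question (extract_question_entities question)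

-- ===== LEMMAS AND PROOFS =====

-- A's cleaning loop equals B's filterMap comprehension
lemma pv_clean_eq (l : List String) (acc : List String) :
    l.foldl (fun acc tok =>
      let t := PySem.Str.stripChars tok pvPunct
      if t ≠ "" then acc ++ [t] else acc) acc
      = acc ++ l.filterMap (fun tok =>
          let t := PySem.Str.stripChars tok pvPunct
          if t = "" then none else some t) := by
  induction l generalizing acc with
  | nil => simp
  | cons x xs ih =>
    rw [List.foldl_cons, List.filterMap_cons, ih]
    by_cases h : PySem.Str.stripChars x pvPunct = "" <;> simp [h]

-- A's flush applied to the final state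
def pvFinish (st : List String × List String) : List String :=
  if st.2 ≠ [] then st.1 ++ [PySem.Str.join " " st.2] else st.1

-- A's loop written over (token, flag) pairs, with the running current-entity
def pvAux : List String → List (String × Bool) → List String
  | c, [] => if c = [] then [] else [PySem.Str.join " " c]
  | c, (t, b) :: ps =>
    if b then pvAux (c ++ [t]) ps
    else (if c = [] then [] else [PySem.Str.join " " c]) ++ pvAux [] ps

lemma pvStepA_eq (st : List String × List String) (p : Int × String) :
    pvStepA st p =
      if pvFlag p.1 p.2 then (st.1, st.2 ++ [p.2])
      else (if st.2 = [] then st else (st.1 ++ [PySem.Str.join " " st.2], [])) := by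
  obtain ⟨e, c⟩ := st
  obtain ⟨i, t⟩ := p
  simp only [pvStepA, pvFlag]
  by_cases hi : i = 0
  · subst hi
    simp only [decide_eq_true_eq]
    by_cases hc : c = [] <;> simp [hc]
  · have : PySem.Str.pyGet? t 0 = t.toList[(0:Nat)]? := by
      simpa using PySem.Str.pyGet?_natCast t 0
    cases ht : t.toList with
    | nil =>
      simp only [hi, ht, this, List.getElem?_nil]
      by_cases hc : c = [] <;> simp [hc, hi]
    | cons ch rest =>
      simp only [hi, ht, this, List.getElem?_cons_zero]
      by_cases hcap : PySem.Chars.isupper ch <;>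
        by_cases hstop : PySem.Str.lower t ∈ pvStopWords <;>
          by_cases hc : c = [] <;> simp [hcap, hstop, hc, hi]

lemma pv_fold_aux (ps : List (Int × String)) (e c : List String) :
    pvFinish (ps.foldl pvStepA (e, c))
      = e ++ pvAux c (ps.map (fun p => (p.2, pvFlag p.1 p.2))) := by
  induction ps generalizing e c with
  | nil =>
    simp only [List.foldl_nil, List.map_nil, pvFinish, pvAux]
    by_cases hc : c = [] <;> simp [hc]
  | cons p ps ih =>
    simp only [List.foldl_cons, List.map_cons, pvStepA_eq]
    by_cases hf : pvFlag p.1 p.2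
    · simp [hf, pvAux, ih]
    · by_cases hc : c = [] <;> simp [hf, hc, pvAux, ih]

-- pvAux with running current c is pvGroupRuns, with c prepended to the first run
lemma pv_aux_eq (ps : List (String × Bool)) (c : List String) :
    pvAux c ps
      = if c = [] then pvGroupRuns ps
        else PySem.Str.join " " (c ++ (ps.takeWhile (·.2)).map (·.1))
               :: pvGroupRuns (ps.dropWhile (·.2)) := by
  induction ps generalizing c with
  | nil =>
    by_cases hc : c = [] <;> simp [pvAux, pvGroupRuns, hc]
  | cons p ps ih =>
    obtain ⟨t, b⟩ := p
    cases b with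
    | true =>
      by_cases hc : c = []
      · subst hc
        simp only [pvAux, pvGroupRuns, List.takeWhile_cons, List.dropWhile_cons]
        simpa using ih [t]
      · simp only [pvAux, if_neg hc, List.takeWhile_cons, List.dropWhile_cons]
        have := ih (c ++ [t])
        simp only [if_neg (by simp : c ++ [t] ≠ [])] at this
        simpa using this
    | false =>
      by_cases hc : c = []
      · subst hc
        simpa [pvAux, pvGroupRuns] using ih []
      · simp only [pvAux, if_neg hc, List.takeWhile_cons, List.dropWhile_cons]
        have := ih []
        simp [pvGroupRuns, this]

-- zip of the tokens with the flag list is the pair list A's loop traverses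
lemma pv_map_enum_zip {α β : Type} (l : List α) (s : Int) (g : Int → α → β) :
    (PySem.List.enumerate l s).map (fun p => (p.2, g p.1 p.2))
      = l.zip ((PySem.List.enumerate l s).map (fun p => g p.1 p.2)) := by
  induction l generalizing s with
  | nil => simp [PySem.List.enumerate_nil]
  | cons x xs ih => simp [PySem.List.enumerate_cons, ih]

-- ===== VERDICT (by name: the statement is the Claim_ definition above) =====
theorem extract_question_entities_spec : Claim_equal_extract_question_entities := by
  intro q _
  unfold Spec_extract_question_entities extract_question_entities extract_question_entities_alt
  by_cases h0 : PySem.Str.split₀ q = []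
  · simp [h0]
  · rw [if_neg h0, pv_clean_eq, List.nil_append]
    by_cases hcl : (PySem.Str.split₀ q).filterMap (fun tok =>
        let t := PySem.Str.stripChars tok pvPunct
        if t = "" then none else some t) = []
    · simp [hcl]
    · rw [if_neg hcl, if_neg hcl]
      show pvFinish _ = _
      rw [pv_fold_aux, pv_aux_eq, pv_map_enum_zip]
      simp
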